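-- pv_equiv track=rewrite | github.com/delorenj/voxxy | .augment/skills/shared/scripts/skf-severity-classify.py | classify_finding
-- ===== SOURCE A (Python) =====
-- CRITICAL_RULES = [
--     {"type": "removed", "categories": {"export", "module", "class", "interface"}},
--     {"type": "changed", "categories": {"signature", "parameter_count", "return_type", "inheritance", "interface_contract"}},
--     {"type": "renamed", "categories": {"export", "module"}},
-- ]
--
-- HIGH_RULES = [
--     {"type": "added", "categories": {"export"}, "threshold": 3},  # >3 new exports
--     {"type": "removed", "categories": {"internal_helper"}},
--     {"type": "changed", "categories": {"default_value", "required_parameter"}},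
--     {"type": "deprecated", "categories": {"export"}},
-- ]
--
-- MEDIUM_RULES = [
--     {"type": "changed", "categories": {"implementation", "optional_parameter", "internal_pattern"}},
--     {"type": "added", "categories": {"export"}, "threshold_max": 3},  # 1-3 new exports
--     {"type": "moved", "categories": {"export", "function"}},
-- ]
--
-- LOW_CATEGORIES = {"style", "convention", "comment", "documentation", "whitespace", "test", "internal", "private"}
--
-- def classify_finding(finding, added_export_count=0):
--     """Classify a single finding's severity. Returns severity string."""
--     f_type = finding.get("type", "").lower()
--     f_category = finding.get("category", "").lower()
--
--     # Check CRITICAL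
--     for rule in CRITICAL_RULES:
--         if f_type == rule["type"] and f_category in rule["categories"]:
--             return "CRITICAL"
--
--     # Check HIGH
--     for rule in HIGH_RULES:
--         if f_type == rule["type"]:
--             if f_category in rule["categories"]:
--                 if "threshold" in rule:
--                     if f_type == "added" and f_category == "export" and added_export_count > rule["threshold"]:
--                         return "HIGH"
--                 else:
--                     return "HIGH"
--
--     # Check MEDIUM
--     for rule in MEDIUM_RULES:
--         if f_type == rule["type"]:
--             if f_category in rule["categories"]:
--                 if "threshold_max" in rule:
--                     if f_type == "added" and f_category == "export" and added_export_count <= rule["threshold_max"]: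
--                         return "MEDIUM"
--                 else:
--                     return "MEDIUM"
--
--     # Check LOW
--     if f_category in LOW_CATEGORIES:
--         return "LOW"
--
--     # Semantic findings default to MEDIUM
--     if f_type == "semantic":
--         return "MEDIUM"
--
--     # Default: MEDIUM for unrecognized patterns
--     return "MEDIUM"
-- ===== SOURCE B (Python) =====
-- LOW_CATEGORIES = {"style", "convention", "comment", "documentation", "whitespace", "test", "internal", "private"}
--
-- # One flat index: (type, category) -> severity, built once from the rule tables.
-- _SEVERITY = {}
-- for _sev, _pairs in [
--     ("CRITICAL", [("removed", ("export", "module", "class", "interface")),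
--                   ("changed", ("signature", "parameter_count", "return_type", "inheritance", "interface_contract")),
--                   ("renamed", ("export", "module"))]),
--     ("HIGH", [("removed", ("internal_helper",)),
--               ("changed", ("default_value", "required_parameter")),
--               ("deprecated", ("export",))]),
--     ("MEDIUM", [("changed", ("implementation", "optional_parameter", "internal_pattern")),
--                 ("moved", ("export", "function"))]),
-- ]:
--     for _t, _cats in _pairs:
--         for _c in _cats:
--             _SEVERITY[(_t, _c)] = _sev
--
-- def classify_finding(finding, added_export_count=0):
--     """Classify a single finding's severity. Returns severity string."""
--     f_type = finding.get("type", "").lower()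
--     f_category = finding.get("category", "").lower()
--     if f_type == "added" and f_category == "export":
--         return "HIGH" if added_export_count > 3 else "MEDIUM"
--     sev = _SEVERITY.get((f_type, f_category))
--     if sev is not None:
--         return sev
--     if f_category in LOW_CATEGORIES:
--         return "LOW"
--     return "MEDIUM"
-- ===== Notes on version B (the rewrite author's own statement) =====
-- stated objective: idiomatic
-- what changed: Replaces the four sequential rule-table scans (CRITICAL/HIGH/MEDIUM loops with per-rule threshold checks) by a single flat (type, category) -> severity dict built once at module load, a special case for the added/export threshold, and one lookup with a LOW/MEDIUM fallback.
import Mathlib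
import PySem

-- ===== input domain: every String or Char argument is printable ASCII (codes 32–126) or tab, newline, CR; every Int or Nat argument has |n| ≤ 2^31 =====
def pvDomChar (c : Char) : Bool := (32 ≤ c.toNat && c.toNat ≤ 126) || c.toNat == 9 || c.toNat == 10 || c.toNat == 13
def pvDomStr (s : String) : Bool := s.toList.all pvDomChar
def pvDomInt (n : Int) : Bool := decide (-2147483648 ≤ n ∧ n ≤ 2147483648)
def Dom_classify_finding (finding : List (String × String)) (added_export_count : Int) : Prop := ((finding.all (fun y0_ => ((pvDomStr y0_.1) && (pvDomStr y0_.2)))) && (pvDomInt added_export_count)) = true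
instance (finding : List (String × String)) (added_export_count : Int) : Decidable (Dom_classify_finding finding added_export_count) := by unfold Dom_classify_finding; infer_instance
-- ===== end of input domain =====

-- B re-implements A's four sequential rule-table scans as one flat (type, category) -> severity
-- index built once plus a single lookup (objective: idiomatic/alternative; no speed claim).

-- ===== PORT A =====
def pvCriticalRules : List (String × List String) :=
  [("removed", ["export", "module", "class", "interface"]),
   ("changed", ["signature", "parameter_count", "return_type", "inheritance", "interface_contract"]),
   ("renamed", ["export", "module"])]

-- Option Int = presence/value of the "threshold" key
def pvHighRules : List (String × List String × Option Int) :=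
  [("added", ["export"], some 3),
   ("removed", ["internal_helper"], none),
   ("changed", ["default_value", "required_parameter"], none),
   ("deprecated", ["export"], none)]

-- Option Int = presence/value of the "threshold_max" key
def pvMediumRules : List (String × List String × Option Int) :=
  [("changed", ["implementation", "optional_parameter", "internal_pattern"], none),
   ("added", ["export"], some 3),
   ("moved", ["export", "function"], none)]

def pvLowCategories : List String :=
  ["style", "convention", "comment", "documentation", "whitespace", "test", "internal", "private"]

def pvScanCritical (ft fc : String) : List (String × List String) → Option String
  | [] => none
  | (t, cats) :: rest =>
    if ft == t && cats.contains fc then some "CRITICAL" else pvScanCritical ft fc rest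

def pvScanHigh (ft fc : String) (cnt : Int) : List (String × List String × Option Int) → Option String
  | [] => none
  | (t, cats, thr) :: rest =>
    if ft == t then
      if cats.contains fc then
        match thr with
        | some th =>
          if ft == "added" && fc == "export" && decide (cnt > th) then some "HIGH"
          else pvScanHigh ft fc cnt rest
        | none => some "HIGH"
      else pvScanHigh ft fc cnt rest
    else pvScanHigh ft fc cnt rest

def pvScanMedium (ft fc : String) (cnt : Int) : List (String × List String × Option Int) → Option String
  | [] => none
  | (t, cats, thr) :: rest =>
    if ft == t then
      if cats.contains fc then
        match thr with
        | some th =>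
          if ft == "added" && fc == "export" && decide (cnt ≤ th) then some "MEDIUM"
          else pvScanMedium ft fc cnt rest
        | none => some "MEDIUM"
      else pvScanMedium ft fc cnt rest
    else pvScanMedium ft fc cnt rest

def pvClassifyCoreA (ft fc : String) (cnt : Int) : String :=
  match pvScanCritical ft fc pvCriticalRules with
  | some s => s
  | none =>
    match pvScanHigh ft fc cnt pvHighRules with
    | some s => s
    | none =>
      match pvScanMedium ft fc cnt pvMediumRules with
      | some s => s
      | none =>
        if pvLowCategories.contains fc then "LOW"
        else if ft == "semantic" then "MEDIUM"
        else "MEDIUM"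

def classify_finding (finding : List (String × String)) (added_export_count : Int) : String :=
  let f_type := PySem.Str.lower ((PySem.Dict.mk finding).getD "type" "")
  let f_category := PySem.Str.lower ((PySem.Dict.mk finding).getD "category" "")
  pvClassifyCoreA f_type f_category added_export_count

-- ===== PORT B =====
def pvRuleEntries : List (String × List (String × List String)) :=
  [("CRITICAL", [("removed", ["export", "module", "class", "interface"]),
                 ("changed", ["signature", "parameter_count", "return_type", "inheritance", "interface_contract"]),
                 ("renamed", ["export", "module"])]),
   ("HIGH", [("removed", ["internal_helper"]),
             ("changed", ["default_value", "required_parameter"]),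
             ("deprecated", ["export"])]),
   ("MEDIUM", [("changed", ["implementation", "optional_parameter", "internal_pattern"]),
               ("moved", ["export", "function"])])]

def pvSeverityMap : PySem.Dict (String × String) String :=
  pvRuleEntries.foldl
    (fun d e => e.2.foldl (fun d p => p.2.foldl (fun d c => d.insert (p.1, c) e.1) d) d)
    PySem.Dict.empty

def pvClassifyCoreB (ft fc : String) (cnt : Int) : String :=
  if ft == "added" && fc == "export" then
    if decide (cnt > 3) then "HIGH" else "MEDIUM"
  else
    match pvSeverityMap.get? (ft, fc) with
    | some s => s
    | none => if pvLowCategories.contains fc then "LOW" else "MEDIUM"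

def classify_finding_alt (finding : List (String × String)) (added_export_count : Int) : String :=
  let f_type := PySem.Str.lower ((PySem.Dict.mk finding).getD "type" "")
  let f_category := PySem.Str.lower ((PySem.Dict.mk finding).getD "category" "")
  pvClassifyCoreB f_type f_category added_export_count

-- ===== PRECONDITION & SPEC =====
def Spec_classify_finding (finding : List (String × String)) (added_export_count : Int) (out : String) : Prop := out = classify_finding_alt finding added_export_count
instance (finding : List (String × String)) (added_export_count : Int) (out : String) : Decidable (Spec_classify_finding finding added_export_count out) := by unfold Spec_classify_finding; infer_instance

-- ===== CLAIM (what is proved, stated in full; the proofs are below) =====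
def Claim_equal_classify_finding : Prop := ∀ (finding : List (String × String)) (added_export_count : Int), Dom_classify_finding finding added_export_count → Spec_classify_finding finding added_export_count (classify_finding finding added_export_count)

-- ===== LEMMAS AND PROOFS =====

set_option maxHeartbeats 1000000 in
theorem core_eq (ft fc : String) (cnt : Int) :
    pvClassifyCoreA ft fc cnt = pvClassifyCoreB ft fc cnt := by
  simp only [pvClassifyCoreA, pvClassifyCoreB, pvScanCritical, pvScanHigh, pvScanMedium,
    pvCriticalRules, pvHighRules, pvMediumRules, pvRuleEntries, pvSeverityMap,
    pvLowCategories, List.foldl, PySem.Dict.get?_insert, PySem.Dict.get?_empty,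
    List.contains_cons, List.elem_nil, Bool.or_false, Bool.and_eq_true, beq_iff_eq,
    Prod.mk.injEq, decide_eq_true_eq]
  by_cases h0 : ft = "removed"
  · subst h0
    by_cases c0 : fc = "export"
    · subst c0; simp
    ·
      by_cases c1 : fc = "module"
      · subst c1; simp
      ·
        by_cases c2 : fc = "class"
        · subst c2; simp
        ·
          by_cases c3 : fc = "interface"
          · subst c3; simp
          ·
            by_cases c4 : fc = "internal_helper"
            · subst c4; simp
            ·
              simp [c0, c1, c2, c3, c4]
  ·
    by_cases h1 : ft = "changed"
    · subst h1
      by_cases c0 : fc = "signature"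
      · subst c0; simp
      ·
        by_cases c1 : fc = "parameter_count"
        · subst c1; simp
        ·
          by_cases c2 : fc = "return_type"
          · subst c2; simp
          ·
            by_cases c3 : fc = "inheritance"
            · subst c3; simp
            ·
              by_cases c4 : fc = "interface_contract"
              · subst c4; simp
              ·
                by_cases c5 : fc = "default_value"
                · subst c5; simp
                ·
                  by_cases c6 : fc = "required_parameter"
                  · subst c6; simp
                  ·
                    by_cases c7 : fc = "implementation"
                    · subst c7; simp
                    ·
                      by_cases c8 : fc = "optional_parameter"
                      · subst c8; simp
                      ·
                        by_cases c9 : fc = "internal_pattern"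
                        · subst c9; simp
                        ·
                          simp [c0, c1, c2, c3, c4, c5, c6, c7, c8, c9]
    ·
      by_cases h2 : ft = "renamed"
      · subst h2
        by_cases c0 : fc = "export"
        · subst c0; simp
        ·
          by_cases c1 : fc = "module"
          · subst c1; simp
          ·
            simp [c0, c1]
      ·
        by_cases h3 : ft = "added"
        · subst h3
          by_cases c0 : fc = "export"
          · subst c0
            by_cases hc : (3:Int) < cnt
            · simp [hc]
            · simp [hc, show cnt ≤ 3 from by omega]
          ·
            simp [c0]
        ·
          by_cases h4 : ft = "deprecated"
          · subst h4
            by_cases c0 : fc = "export"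
            · subst c0; simp
            ·
              simp [c0]
          ·
            by_cases h5 : ft = "moved"
            · subst h5
              by_cases c0 : fc = "export"
              · subst c0; simp
              ·
                by_cases c1 : fc = "function"
                · subst c1; simp
                ·
                  simp [c0, c1]
            ·
              simp [h0, h1, h2, h3, h4, h5]

-- ===== VERDICT (by name: the statement is the Claim_ definition above) =====
theorem classify_finding_spec : Claim_equal_classify_finding := by
  intro finding cnt _
  unfold Spec_classify_finding classify_finding classify_finding_alt
  exact core_eq _ _ _
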